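-- pv_equiv track=rewrite | github.com/nick-hiebl/adventofcode | day14/main.py | rollUp
-- ===== SOURCE A (Python) =====
-- def rollUp(grid):
--   result = []
--   for col in grid:
--     balls = 0
--     space = 0
--
--     out = ''
--
--     for c in col:
--       if c == '.':
--         space += 1
--       elif c == 'O':
--         space += 1
--         balls += 1
--       elif c == '#':
--         out += balls * 'O' + (space - balls) * '.' + '#'
--         balls = 0
--         space = 0
--     out += balls * 'O' + (space - balls) * '.'
--
--     result.append(out)
--   return tuple(result)
-- ===== SOURCE B (Python) =====
-- def rollUp(grid):
--   result = []
--   for col in grid: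
--     segs = col.split('#')
--     result.append('#'.join('O' * seg.count('O') + '.' * seg.count('.') for seg in segs))
--   return tuple(result)
-- ===== Notes on version B (the rewrite author's own statement) =====
-- stated objective: simpler
-- what changed: Replaces the per-character state machine (balls/space counters flushed at each '#') by splitting each column on '#', rebuilding every segment from its 'O' and '.' counts, and joining with '#'.
import Mathlib
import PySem

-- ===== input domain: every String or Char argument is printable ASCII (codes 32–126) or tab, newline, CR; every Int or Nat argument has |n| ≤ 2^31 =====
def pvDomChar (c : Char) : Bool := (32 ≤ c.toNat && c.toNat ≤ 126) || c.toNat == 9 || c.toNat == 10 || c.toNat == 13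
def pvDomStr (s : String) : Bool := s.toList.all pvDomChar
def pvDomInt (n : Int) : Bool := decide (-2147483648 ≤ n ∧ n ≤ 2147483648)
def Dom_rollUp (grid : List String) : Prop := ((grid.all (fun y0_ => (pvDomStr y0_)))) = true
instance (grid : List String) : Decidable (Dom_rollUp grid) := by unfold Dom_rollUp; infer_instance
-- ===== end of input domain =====

-- B replaces A's per-character counter state machine by split-on-'#' / rebuild-each-segment / join: simpler decomposition, same cost.

-- ===== PORT A =====
-- inner loop of A: state (balls, space, out); `n * 'O'` for an int n is [] when n < 0, matching Int.toNat's clamp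
def rollUpColA (col : List Char) : List Char :=
  let st := col.foldl (fun (st : Int × Int × List Char) c =>
    if c = '.' then (st.1, st.2.1 + 1, st.2.2)
    else if c = 'O' then (st.1 + 1, st.2.1 + 1, st.2.2)
    else if c = '#' then
      (0, 0, st.2.2 ++ List.replicate st.1.toNat 'O' ++ List.replicate (st.2.1 - st.1).toNat '.' ++ ['#'])
    else st) (0, 0, [])
  st.2.2 ++ List.replicate st.1.toNat 'O' ++ List.replicate (st.2.1 - st.1).toNat '.'

def rollUp (grid : List String) : List String :=
  grid.map (fun col => String.mk (rollUpColA col.toList))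

-- ===== PORT B =====
-- hand port of Python's str.split('#'): always returns at least one (possibly empty) segment
def splitHash : List Char → List (List Char)
  | [] => [[]]
  | c :: t =>
    if c = '#' then [] :: splitHash t
    else match splitHash t with
      | [] => [[c]]
      | s :: rest => (c :: s) :: rest

-- 'O' * seg.count('O') + '.' * seg.count('.')
def renderSeg (seg : List Char) : List Char :=
  List.replicate (seg.count 'O') 'O' ++ List.replicate (seg.count '.') '.'

-- hand port of '#'.join
def joinHash : List (List Char) → List Char
  | [] => []
  | [x] => x
  | x :: y :: t => x ++ '#' :: joinHash (y :: t)

def rollUp_alt (grid : List String) : List String :=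
  grid.map (fun col => String.mk (joinHash ((splitHash col.toList).map renderSeg)))

-- ===== PRECONDITION & SPEC =====
def Spec_rollUp (grid : List String) (out : List String) : Prop := out = rollUp_alt grid
instance (grid : List String) (out : List String) : Decidable (Spec_rollUp grid out) := by unfold Spec_rollUp; infer_instance

-- ===== CLAIM (what is proved, stated in full; the proofs are below) =====
def Claim_equal_rollUp : Prop := ∀ (grid : List String), Dom_rollUp grid → Spec_rollUp grid (rollUp grid)

-- ===== LEMMAS AND PROOFS =====

-- recursive restatement of A's inner loop
def aRec : List Char → Int → Int → List Char
  | [], b, s => List.replicate b.toNat 'O' ++ List.replicate (s - b).toNat '.'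
  | c :: t, b, s =>
    if c = '.' then aRec t b (s + 1)
    else if c = 'O' then aRec t (b + 1) (s + 1)
    else if c = '#' then
      (List.replicate b.toNat 'O' ++ List.replicate (s - b).toNat '.' ++ ['#']) ++ aRec t 0 0
    else aRec t b s

def stepA (st : Int × Int × List Char) (c : Char) : Int × Int × List Char :=
  if c = '.' then (st.1, st.2.1 + 1, st.2.2)
  else if c = 'O' then (st.1 + 1, st.2.1 + 1, st.2.2)
  else if c = '#' then
    (0, 0, st.2.2 ++ List.replicate st.1.toNat 'O' ++ List.replicate (st.2.1 - st.1).toNat '.' ++ ['#'])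
  else st

def finishA (st : Int × Int × List Char) : List Char :=
  st.2.2 ++ List.replicate st.1.toNat 'O' ++ List.replicate (st.2.1 - st.1).toNat '.'

lemma fold_aRec (cs : List Char) : ∀ (b s : Int) (out : List Char),
    finishA (cs.foldl stepA (b, s, out)) = out ++ aRec cs b s := by
  induction cs with
  | nil => intro b s out; simp [finishA, aRec]
  | cons c t ih =>
    intro b s out
    by_cases h1 : c = '.'
    · rw [List.foldl_cons]
      show finishA (t.foldl stepA (stepA (b, s, out) c)) = out ++ aRec (c :: t) b s
      simp [stepA, h1, aRec, ih]
    · by_cases h2 : c = 'O'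
      · rw [List.foldl_cons]
        show finishA (t.foldl stepA (stepA (b, s, out) c)) = out ++ aRec (c :: t) b s
        simp [stepA, h1, h2, aRec, ih]
      · by_cases h3 : c = '#'
        · rw [List.foldl_cons]
          show finishA (t.foldl stepA (stepA (b, s, out) c)) = out ++ aRec (c :: t) b s
          simp [stepA, h1, h2, h3, aRec, ih]
        · rw [List.foldl_cons]
          show finishA (t.foldl stepA (stepA (b, s, out) c)) = out ++ aRec (c :: t) b s
          simp [stepA, h1, h2, h3, aRec, ih]

lemma splitHash_ne_nil (cs : List Char) : splitHash cs ≠ [] := by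
  cases cs with
  | nil => simp [splitHash]
  | cons c t =>
    simp only [splitHash]
    split_ifs
    · simp
    · cases h : splitHash t <;> simp

-- first segment with pending counts folded in, then the rendered rest
def bAux (b d : Nat) (cs : List Char) : List Char :=
  match splitHash cs with
  | [] => []
  | s :: rest =>
    List.replicate (b + s.count 'O') 'O' ++ List.replicate (d + s.count '.') '.' ++
      (rest.map renderSeg).flatMap (fun r => '#' :: r)

lemma joinHash_eq (x : List Char) (l : List (List Char)) :
    joinHash (x :: l) = x ++ l.flatMap (fun r => '#' :: r) := by
  induction l generalizing x with
  | nil => simp [joinHash]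
  | cons y t ih => simp [joinHash, ih, List.flatMap_cons]

lemma aRec_eq_bAux (cs : List Char) : ∀ (b d : Nat),
    aRec cs (b : Int) ((b : Int) + (d : Int)) = bAux b d cs := by
  induction cs with
  | nil =>
    intro b d
    simp [aRec, bAux, splitHash]
  | cons c t ih =>
    intro b d
    by_cases h1 : c = '.'
    · have : ((b : Int) + (d : Int)) + 1 = (b : Int) + ((d + 1 : Nat) : Int) := by push_cast; ring
      rw [aRec, if_pos h1, this, ih b (d + 1)]
      unfold bAux
      rcases h : splitHash t with _ | ⟨s, rest⟩
      · exact absurd h (splitHash_ne_nil t)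
      · simp [splitHash, h1, h, List.count_cons]
        omega
    · by_cases h2 : c = 'O'
      · have : ((b : Int) + 1 = ((b + 1 : Nat) : Int)) ∧ ((b : Int) + (d : Int) + 1 = ((b + 1 : Nat) : Int) + (d : Int)) := by
          constructor <;> push_cast <;> ring
        rw [aRec, if_neg h1, if_pos h2, this.1, this.2, ih (b + 1) d]
        unfold bAux
        rcases h : splitHash t with _ | ⟨s, rest⟩
        · exact absurd h (splitHash_ne_nil t)
        · simp [splitHash, h1, h2, h, List.count_cons]
          omega
      · by_cases h3 : c = '#'
        · have h00 : aRec t 0 0 = bAux 0 0 t := by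
            have := ih 0 0; simpa using this
          rw [aRec, if_neg h1, if_neg h2, if_pos h3, h00]
          unfold bAux
          rcases h : splitHash t with _ | ⟨s, rest⟩
          · exact absurd h (splitHash_ne_nil t)
          · simp [splitHash, h3, h, renderSeg, List.flatMap_cons]
        · rw [aRec, if_neg h1, if_neg h2, if_neg h3, ih b d]
          unfold bAux
          rcases h : splitHash t with _ | ⟨s, rest⟩
          · exact absurd h (splitHash_ne_nil t)
          · simp [splitHash, h1, h2, h3, h, List.count_cons]

lemma col_eq (cs : List Char) :
    rollUpColA cs = joinHash ((splitHash cs).map renderSeg) := by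
  have hf : rollUpColA cs = [] ++ aRec cs 0 0 := fold_aRec cs 0 0 []
  have ha : aRec cs 0 0 = bAux 0 0 cs := by
    have := aRec_eq_bAux cs 0 0; simpa using this
  rcases h : splitHash cs with _ | ⟨s, rest⟩
  · exact absurd h (splitHash_ne_nil cs)
  · rw [hf, List.nil_append, ha, bAux, h]
    rw [List.map_cons, joinHash_eq, renderSeg]
    simp

-- ===== VERDICT (by name: the statement is the Claim_ definition above) =====
theorem rollUp_spec : Claim_equal_rollUp := by
  intro grid _
  unfold Spec_rollUp rollUp rollUp_alt
  simp only [col_eq]
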